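-- pv_equiv track=rewrite | github.com/wallneradam/python_sql_schema_sync | schema_sync.py | normalize_expr
-- ===== SOURCE A (Python) =====
-- WHITESPACES = (' ', '\t', '\n', '\r')
--
-- OPERATORS = (',', '+', '-', '/', '*', '&', '<', '=', '>', '%', '^')
--
-- def normalize_expr(expression: str) -> str:
--     """
--     Normalze the given SQL expression to be able to compare
--     :param expression: The expression to normalize
--     :return: The normalized expression
--     """
--     res = ''
--
--     in_string = False
--
--     o = 0
--     lc = None
--     try:
--         while True:
--             c = expression[o]
--             if not in_string:
--                 if c == "'" or c == '"':   # Found string start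
--                     in_string = c
--                 else:
--                     # Ensure one space
--                     if c in WHITESPACES:
--                         if lc == ' ':
--                             o += 1
--                             continue
--                         c = ' '
--                     # Remove unnecessary spaces
--                     if c == ' ' and lc in OPERATORS:
--                         o += 1
--                         continue
--                     elif lc == ' ' and c in OPERATORS:
--                         res = res[:-1]
--
--                 res += c.lower()
--
--             else:
--                 if in_string and c == in_string:
--                     in_string = False
--
--                 res += c
--
--             lc = c
--             o += 1
--
--     except IndexError:  # It is expected: shows no more data
--         pass
--
--     return res
-- ===== SOURCE B (Python) =====
-- WHITESPACES = (' ', '\t', '\n', '\r')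
--
-- OPERATORS = (',', '+', '-', '/', '*', '&', '<', '=', '>', '%', '^')
--
--
-- def _norm_plain(s):
--     """Collapse whitespace runs to one space, drop operator-adjacent spaces, lowercase."""
--     collapsed = []
--     for ch in s:
--         if ch in WHITESPACES:
--             if collapsed and collapsed[-1] == ' ':
--                 continue
--             collapsed.append(' ')
--         else:
--             collapsed.append(ch)
--     out = []
--     for k, ch in enumerate(collapsed):
--         if ch == ' ':
--             if k > 0 and collapsed[k - 1] in OPERATORS:
--                 continue
--             if k + 1 < len(collapsed) and collapsed[k + 1] in OPERATORS:
--                 continue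
--         out.append(ch)
--     return ''.join(out).lower()
--
--
-- def normalize_expr(expression: str) -> str:
--     """Chunk the expression into plain parts and quoted string literals;
--     normalize the plain chunks, copy string literals verbatim."""
--     out = []
--     n = len(expression)
--     i = 0
--     start = 0
--     while i < n:
--         c = expression[i]
--         if c == "'" or c == '"':
--             out.append(_norm_plain(expression[start:i]))
--             j = expression.find(c, i + 1)
--             end = n if j == -1 else j + 1
--             out.append(expression[i:end])
--             i = end
--             start = end
--         else:
--             i += 1
--     out.append(_norm_plain(expression[start:]))
--     return ''.join(out)
-- ===== Notes on version B (the rewrite author's own statement) =====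
-- stated objective: simpler
-- what changed: Replaces A's single character-at-a-time state machine (in_string/lc flags with res[:-1] back-patching) by chunking the input into plain parts and quoted literals, normalizing each plain chunk with two simple passes (collapse whitespace runs, then drop operator-adjacent spaces) and copying literals verbatim.
import Mathlib
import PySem

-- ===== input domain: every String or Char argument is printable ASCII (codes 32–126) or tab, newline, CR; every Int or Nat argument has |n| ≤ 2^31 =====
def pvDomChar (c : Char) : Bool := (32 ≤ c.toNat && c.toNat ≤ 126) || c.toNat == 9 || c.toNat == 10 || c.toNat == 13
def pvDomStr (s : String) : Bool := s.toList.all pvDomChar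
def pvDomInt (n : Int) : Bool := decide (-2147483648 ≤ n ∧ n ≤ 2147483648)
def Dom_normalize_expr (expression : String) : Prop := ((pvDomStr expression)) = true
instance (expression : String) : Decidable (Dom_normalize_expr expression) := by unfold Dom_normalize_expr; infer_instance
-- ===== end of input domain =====

-- B re-chunks the expression into plain parts and quoted literals and normalizes each plain
-- chunk by two simple passes (collapse whitespace, drop operator-adjacent spaces) instead of
-- A's single character-at-a-time state machine; objective: simpler/idiomatic, same results.

-- ===== PORT A =====
def pvIsWs (c : Char) : Bool := c = ' ' || c = '\t' || c = '\n' || c = '\r'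

def pvIsOp (c : Char) : Bool :=
  c = ',' || c = '+' || c = '-' || c = '/' || c = '*' || c = '&' ||
  c = '<' || c = '=' || c = '>' || c = '%' || c = '^'

def pvIsOpO : Option Char → Bool
  | some c => pvIsOp c
  | none => false

-- A's while/try loop, step for step: state = (remaining input, in_string, lc, res);
-- `res = res[:-1]` is `res.dropLast`, `c.lower()` is PySem.Chars.lowerChar.
def aGo : List Char → Option Char → Option Char → List Char → List Char
  | [], _, _, res => res
  | c :: rest, none, lc, res =>
    if c = '\'' ∨ c = '"' then                          -- found string start
      aGo rest (some c) (some c) (res ++ [PySem.Chars.lowerChar c])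
    else if pvIsWs c then                               -- c is replaced by ' '
      if lc = some ' ' then aGo rest none lc res        -- continue (lc unchanged)
      else if pvIsOpO lc then aGo rest none lc res      -- ' ' after operator: continue
      else aGo rest none (some ' ') (res ++ [PySem.Chars.lowerChar ' '])
    else
      if lc = some ' ' ∧ pvIsOp c then                  -- remove space before operator
        aGo rest none (some c) (res.dropLast ++ [PySem.Chars.lowerChar c])
      else aGo rest none (some c) (res ++ [PySem.Chars.lowerChar c])
  | c :: rest, some q, _lc, res =>
    if c = q then aGo rest none (some c) (res ++ [c])   -- string ends
    else aGo rest (some q) (some c) (res ++ [c])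

def normalize_expr (expression : String) : String :=
  String.ofList (aGo expression.toList none none [])

-- ===== PORT B =====
def pvIsQuote (c : Char) : Bool := c = '\'' || c = '"'

-- first pass of _norm_plain: collapse whitespace runs to one ' ' (flag: last emitted was ' ')
def pvCollapse : Bool → List Char → List Char
  | _, [] => []
  | lastSp, c :: rest =>
    if pvIsWs c then
      if lastSp then pvCollapse lastSp rest else ' ' :: pvCollapse true rest
    else c :: pvCollapse false rest

def pvHeadOp : List Char → Bool
  | [] => false
  | c :: _ => pvIsOp c

-- second pass of _norm_plain: drop each ' ' whose neighbour is an operator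
def pvRmOps : Option Char → List Char → List Char
  | _, [] => []
  | prev, c :: rest =>
    if c = ' ' ∧ (pvIsOpO prev || pvHeadOp rest) then pvRmOps (some c) rest
    else c :: pvRmOps (some c) rest

def pvNormPlain (s : List Char) : List Char :=
  PySem.Chars.lower (pvRmOps none (pvCollapse false s))

-- normalize_expr of Source B: alternate plain chunks and quoted literals
-- (Source B's `find` scan is the takeWhile/dropWhile split below)
def altGo (cs : List Char) : List Char :=
  match h : cs.dropWhile (fun c => !pvIsQuote c) with
  | [] => pvNormPlain (cs.takeWhile (fun c => !pvIsQuote c))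
  | q :: tail =>
    pvNormPlain (cs.takeWhile (fun c => !pvIsQuote c)) ++
      q :: (tail.takeWhile (fun c => c != q) ++
        match h2 : tail.dropWhile (fun c => c != q) with
        | [] => []
        | q2 :: tail2 => q2 :: altGo tail2)
  termination_by cs.length
  decreasing_by
    have h1 := List.length_dropWhile_le (fun c => !pvIsQuote c) cs
    have h3 := List.length_dropWhile_le (fun c => c != q) tail
    rw [h] at h1
    rw [h2] at h3
    simp at h1 h3
    omega

def normalize_expr_alt (expression : String) : String :=
  String.ofList (altGo expression.toList)

-- ===== PRECONDITION & SPEC =====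
def Spec_normalize_expr (expression : String) (out : String) : Prop := out = normalize_expr_alt expression
instance (expression : String) (out : String) : Decidable (Spec_normalize_expr expression out) := by unfold Spec_normalize_expr; infer_instance

-- ===== CLAIM (what is proved, stated in full; the proofs are below) =====
def Claim_equal_normalize_expr : Prop := ∀ (expression : String), Dom_normalize_expr expression → Spec_normalize_expr expression (normalize_expr expression)

-- ===== LEMMAS AND PROOFS =====

-- A's pending-space reformulation: when lc = ' ', the trailing space of res is kept "pending"
def pvPend (lc : Option Char) : List Char := if lc = some ' ' then [' '] else []

-- single-pass reference semantics of A (pvP: outside a string, pvS: inside a string opened by q)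
mutual
def pvP : Option Char → List Char → List Char
  | lc, [] => pvPend lc
  | lc, c :: rest =>
    if pvIsQuote c then pvPend lc ++ PySem.Chars.lowerChar c :: pvS c rest
    else if pvIsWs c then
      if lc = some ' ' then pvP lc rest
      else if pvIsOpO lc then pvP lc rest
      else pvP (some ' ') rest
    else
      if lc = some ' ' ∧ pvIsOp c then PySem.Chars.lowerChar c :: pvP (some c) rest
      else pvPend lc ++ PySem.Chars.lowerChar c :: pvP (some c) rest

def pvS : Char → List Char → List Char
  | _, [] => []
  | q, c :: rest => if c = q then c :: pvP (some c) rest else c :: pvS q rest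
end

lemma pvPend_nil {lc : Option Char} (h : lc ≠ some ' ') : pvPend lc = [] := by
  simp [pvPend, h]

lemma ne_space_of_op {c : Char} (h : pvIsOp c = true) : c ≠ ' ' := by
  rintro rfl; simp [pvIsOp] at h

lemma ne_space_of_not_ws {c : Char} (h : ¬ pvIsWs c = true) : c ≠ ' ' := by
  rintro rfl; simp [pvIsWs] at h

lemma ne_space_of_quote {c : Char} (h : pvIsQuote c = true) : c ≠ ' ' := by
  rintro rfl; simp [pvIsQuote] at h

lemma aGo_P (cs : List Char) :
    (∀ lc res, aGo cs none lc (res ++ pvPend lc) = res ++ pvP lc cs) ∧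
    (∀ q lc res, pvIsQuote q = true → aGo cs (some q) lc res = res ++ pvS q cs) := by
  induction cs with
  | nil =>
    constructor
    · intro lc res; simp [aGo, pvP]
    · intro q lc res _; simp [aGo, pvS]
  | cons c rest ih =>
    constructor
    · intro lc res
      by_cases hq : c = '\'' ∨ c = '"'
      · have hqq : pvIsQuote c = true := by rcases hq with h | h <;> simp [pvIsQuote, h]
        rw [show aGo (c :: rest) none lc (res ++ pvPend lc)
              = aGo rest (some c) (some c) ((res ++ pvPend lc) ++ [PySem.Chars.lowerChar c]) by
            simp [aGo, hq]]
        rw [ih.2 c (some c) _ hqq]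
        simp [pvP, hqq]
      · have hqq : pvIsQuote c = false := by
          simp only [pvIsQuote]; rcases not_or.mp hq with ⟨h1, h2⟩; simp [h1, h2]
        by_cases hw : pvIsWs c
        · by_cases hl : lc = some ' '
          · subst hl
            rw [show aGo (c :: rest) none (some ' ') (res ++ pvPend (some ' '))
                  = aGo rest none (some ' ') (res ++ pvPend (some ' ')) by simp [aGo, hq, hw]]
            rw [ih.1 (some ' ') res]
            simp [pvP, hqq, hw]
          · by_cases ho : pvIsOpO lc
            · rw [pvPend_nil hl]
              rw [show aGo (c :: rest) none lc (res ++ [])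
                    = aGo rest none lc (res ++ pvPend lc) by simp [aGo, hq, hw, hl, ho, pvPend_nil hl]]
              rw [ih.1 lc res]
              simp [pvP, hqq, hw, hl, ho]
            · rw [pvPend_nil hl]
              rw [show aGo (c :: rest) none lc (res ++ [])
                    = aGo rest none (some ' ') (res ++ [PySem.Chars.lowerChar ' ']) by
                  simp [aGo, hq, hw, hl, ho]]
              have : PySem.Chars.lowerChar ' ' = ' ' := rfl
              rw [this]
              have h2 := ih.1 (some ' ') res
              simp only [pvPend, if_true, reduceIte] at h2
              rw [h2]
              simp [pvP, hqq, hw, hl, ho, pvPend]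
        · by_cases hop : lc = some ' ' ∧ pvIsOp c
          · obtain ⟨hl, hc⟩ := hop
            subst hl
            rw [show aGo (c :: rest) none (some ' ') (res ++ pvPend (some ' '))
                  = aGo rest none (some c) ((res ++ pvPend (some ' ')).dropLast ++ [PySem.Chars.lowerChar c]) by
                simp [aGo, hq, hw, hc]]
            have hd : (res ++ pvPend (some ' ')).dropLast = res := by simp [pvPend]
            rw [hd]
            have hpc : pvPend (some c) = [] := pvPend_nil (by simp [ne_space_of_op hc])
            have := ih.1 (some c) (res ++ [PySem.Chars.lowerChar c])
            rw [hpc] at this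
            simp only [List.append_nil] at this
            rw [this]
            simp [pvP, hqq, hw, hc]
          · rw [show aGo (c :: rest) none lc (res ++ pvPend lc)
                  = aGo rest none (some c) ((res ++ pvPend lc) ++ [PySem.Chars.lowerChar c]) by
                simp only [aGo]
                rw [if_neg hq, if_neg (by simpa using hw), if_neg hop]]
            have hpc : pvPend (some c) = [] := pvPend_nil (by simp [ne_space_of_not_ws hw])
            have := ih.1 (some c) ((res ++ pvPend lc) ++ [PySem.Chars.lowerChar c])
            rw [hpc] at this
            simp only [List.append_nil] at this
            rw [this]
            simp [pvP, hqq, hw, hop]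
    · intro q lc res hq
      by_cases hc : c = q
      · subst hc
        rw [show aGo (c :: rest) (some c) lc res = aGo rest none (some c) (res ++ [c]) by
            simp [aGo]]
        have hpc : pvPend (some c) = [] := pvPend_nil (by simp [ne_space_of_quote hq])
        have := ih.1 (some c) (res ++ [c])
        rw [hpc] at this
        simp only [List.append_nil] at this
        rw [this]
        simp [pvS]
      · rw [show aGo (c :: rest) (some q) lc res = aGo rest (some q) (some c) (res ++ [c]) by
            simp [aGo, hc]]
        rw [ih.2 q (some c) (res ++ [c]) hq]
        simp [pvS, hc]

lemma lowerChar_space : PySem.Chars.lowerChar ' ' = ' ' := rfl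

lemma ne_some_space_of_opO {prev : Option Char} (h : pvIsOpO prev = true) : prev ≠ some ' ' := by
  intro heq; rw [heq] at h; simp [pvIsOpO, pvIsOp] at h

lemma pvP_state_irrel (lc : Option Char) (h1 : lc ≠ some ' ') (h2 : pvIsOpO lc = false)
    (cs : List Char) : pvP lc cs = pvP none cs := by
  cases cs with
  | nil => simp [pvP, pvPend, h1]
  | cons c rest =>
    simp only [pvP]
    rw [h2]
    simp [pvPend, h1, pvIsOpO]

lemma pvP_append_quote (q : Char) (hq : pvIsQuote q = true) :
    ∀ (p : List Char), (∀ c ∈ p, pvIsQuote c = false) → ∀ lc tail,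
      pvP lc (p ++ q :: tail) = pvP lc p ++ PySem.Chars.lowerChar q :: pvS q tail := by
  intro p
  induction p with
  | nil => intro _ lc tail; simp [pvP, hq]
  | cons a p' ih =>
    intro hmem lc tail
    have ha : pvIsQuote a = false := hmem a (by simp)
    have ih' := ih (fun c hc => hmem c (by simp [hc]))
    by_cases hw : pvIsWs a
    · by_cases hl : lc = some ' '
      · simp [pvP, ha, hw, hl, ih']
      · by_cases ho : pvIsOpO lc
        · simp [pvP, ha, hw, hl, ho, ih']
        · simp [pvP, ha, hw, hl, ho, ih']
    · by_cases hop : lc = some ' ' ∧ pvIsOp a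
      · simp [pvP, ha, hw, hop, ih']
      · simp [pvP, ha, hw, hop, ih']

lemma pvS_split (q : Char) : ∀ tail : List Char,
    pvS q tail = tail.takeWhile (fun c => c != q) ++
      (match tail.dropWhile (fun c => c != q) with
        | [] => []
        | q2 :: t2 => q2 :: pvP (some q2) t2) := by
  intro tail
  induction tail with
  | nil => simp [pvS]
  | cons c rest ih =>
    by_cases hc : c = q
    · subst hc; simp [pvS, List.takeWhile_cons, List.dropWhile_cons]
    · simp [pvS, hc, List.takeWhile_cons, List.dropWhile_cons, ih]

lemma pvPlain : ∀ (p : List Char), (∀ c ∈ p, pvIsQuote c = false) →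
    ((∀ prev, pvIsOpO prev = false → prev ≠ some ' ' →
        pvP prev p = PySem.Chars.lower (pvRmOps prev (pvCollapse false p))) ∧
     (∀ prev, pvIsOpO prev = true →
        pvP prev p = PySem.Chars.lower (pvRmOps prev (pvCollapse false p))) ∧
     (∀ prev, pvIsOpO prev = false → prev ≠ some ' ' →
        pvP (some ' ') p = PySem.Chars.lower (pvRmOps prev (' ' :: pvCollapse true p))) ∧
     (∀ prev, pvIsOpO prev = true →
        pvP prev p = PySem.Chars.lower (pvRmOps (some ' ') (pvCollapse true p)))) := by
  intro p
  induction p with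
  | nil =>
    intro _
    refine ⟨?_, ?_, ?_, ?_⟩
    · intro prev h1 h2
      simp [pvP, pvPend, pvRmOps, pvCollapse, PySem.Chars.lower, h2]
    · intro prev h1
      simp [pvP, pvPend, pvRmOps, pvCollapse, PySem.Chars.lower, ne_some_space_of_opO h1]
    · intro prev h1 h2
      simp [pvP, pvPend, pvRmOps, pvHeadOp, pvCollapse, PySem.Chars.lower, h1, lowerChar_space]
    · intro prev h1
      simp [pvP, pvPend, pvRmOps, pvCollapse, PySem.Chars.lower, ne_some_space_of_opO h1]
  | cons c rest ih =>
    intro hmem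
    have hc : pvIsQuote c = false := hmem c (by simp)
    obtain ⟨ih1, ih2, ih3, ih4⟩ := ih (fun d hd => hmem d (by simp [hd]))
    refine ⟨?_, ?_, ?_, ?_⟩
    · -- C1: prev neither operator nor space
      intro prev hpo hps
      by_cases hw : pvIsWs c
      · rw [show pvP prev (c :: rest) = pvP (some ' ') rest from by simp [pvP, hc, hw, hps, hpo],
            show pvCollapse false (c :: rest) = ' ' :: pvCollapse true rest from by simp [pvCollapse, hw]]
        exact ih3 prev hpo hps
      · have hcs : c ≠ ' ' := ne_space_of_not_ws hw
        rw [show pvP prev (c :: rest) = PySem.Chars.lowerChar c :: pvP (some c) rest from by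
              simp [pvP, pvPend, hc, hw, hps, hpo],
            show pvCollapse false (c :: rest) = c :: pvCollapse false rest from by simp [pvCollapse, hw],
            show pvRmOps prev (c :: pvCollapse false rest) = c :: pvRmOps (some c) (pvCollapse false rest) from by
              simp [pvRmOps, hcs]]
        simp only [PySem.Chars.lower, List.map_cons]
        by_cases hoc : pvIsOp c
        · rw [ih2 (some c) (by simpa [pvIsOpO] using hoc)]; rfl
        · rw [ih1 (some c) (by simpa [pvIsOpO] using hoc) (by simp [hcs])]; rfl
    · -- C2: prev is an operator
      intro prev hpo
      have hps : prev ≠ some ' ' := ne_some_space_of_opO hpo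
      by_cases hw : pvIsWs c
      · rw [show pvP prev (c :: rest) = pvP prev rest from by simp [pvP, hc, hw, hps, hpo],
            show pvCollapse false (c :: rest) = ' ' :: pvCollapse true rest from by simp [pvCollapse, hw],
            show pvRmOps prev (' ' :: pvCollapse true rest) = pvRmOps (some ' ') (pvCollapse true rest) from by
              simp [pvRmOps, hpo]]
        exact ih4 prev hpo
      · have hcs : c ≠ ' ' := ne_space_of_not_ws hw
        rw [show pvP prev (c :: rest) = PySem.Chars.lowerChar c :: pvP (some c) rest from by
              simp [pvP, pvPend, hc, hw, hps],
            show pvCollapse false (c :: rest) = c :: pvCollapse false rest from by simp [pvCollapse, hw],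
            show pvRmOps prev (c :: pvCollapse false rest) = c :: pvRmOps (some c) (pvCollapse false rest) from by
              simp [pvRmOps, hcs]]
        simp only [PySem.Chars.lower, List.map_cons]
        by_cases hoc : pvIsOp c
        · rw [ih2 (some c) (by simpa [pvIsOpO] using hoc)]; rfl
        · rw [ih1 (some c) (by simpa [pvIsOpO] using hoc) (by simp [hcs])]; rfl
    · -- C3: pending space, prev neither operator nor space
      intro prev hpo hps
      by_cases hw : pvIsWs c
      · rw [show pvP (some ' ') (c :: rest) = pvP (some ' ') rest from by simp [pvP, hc, hw],
            show pvCollapse true (c :: rest) = pvCollapse true rest from by simp [pvCollapse, hw]]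
        exact ih3 prev hpo hps
      · have hcs : c ≠ ' ' := ne_space_of_not_ws hw
        by_cases hoc : pvIsOp c
        · rw [show pvP (some ' ') (c :: rest) = PySem.Chars.lowerChar c :: pvP (some c) rest from by
                simp [pvP, hc, hw, hoc],
              show pvCollapse true (c :: rest) = c :: pvCollapse false rest from by simp [pvCollapse, hw],
              show pvRmOps prev (' ' :: c :: pvCollapse false rest)
                  = pvRmOps (some ' ') (c :: pvCollapse false rest) from by
                simp [pvRmOps, pvHeadOp, hpo, hoc],
              show pvRmOps (some ' ') (c :: pvCollapse false rest)
                  = c :: pvRmOps (some c) (pvCollapse false rest) from by simp [pvRmOps, hcs]]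
          simp only [PySem.Chars.lower, List.map_cons]
          rw [ih2 (some c) (by simpa [pvIsOpO] using hoc)]; rfl
        · rw [show pvP (some ' ') (c :: rest) = ' ' :: PySem.Chars.lowerChar c :: pvP (some c) rest from by
                simp [pvP, pvPend, hc, hw, hoc],
              show pvCollapse true (c :: rest) = c :: pvCollapse false rest from by simp [pvCollapse, hw],
              show pvRmOps prev (' ' :: c :: pvCollapse false rest)
                  = ' ' :: pvRmOps (some ' ') (c :: pvCollapse false rest) from by
                simp [pvRmOps, pvHeadOp, hpo, hoc],
              show pvRmOps (some ' ') (c :: pvCollapse false rest)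
                  = c :: pvRmOps (some c) (pvCollapse false rest) from by simp [pvRmOps, hcs]]
          simp only [PySem.Chars.lower, List.map_cons, lowerChar_space]
          rw [ih1 (some c) (by simpa [pvIsOpO] using hoc) (by simp [hcs])]; rfl
    · -- C4: prev is an operator, whitespace already swallowed
      intro prev hpo
      have hps : prev ≠ some ' ' := ne_some_space_of_opO hpo
      by_cases hw : pvIsWs c
      · rw [show pvP prev (c :: rest) = pvP prev rest from by simp [pvP, hc, hw, hps, hpo],
            show pvCollapse true (c :: rest) = pvCollapse true rest from by simp [pvCollapse, hw]]
        exact ih4 prev hpo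
      · have hcs : c ≠ ' ' := ne_space_of_not_ws hw
        rw [show pvP prev (c :: rest) = PySem.Chars.lowerChar c :: pvP (some c) rest from by
              simp [pvP, pvPend, hc, hw, hps],
            show pvCollapse true (c :: rest) = c :: pvCollapse false rest from by simp [pvCollapse, hw],
            show pvRmOps (some ' ') (c :: pvCollapse false rest)
                = c :: pvRmOps (some c) (pvCollapse false rest) from by simp [pvRmOps, hcs]]
        simp only [PySem.Chars.lower, List.map_cons]
        by_cases hoc : pvIsOp c
        · rw [ih2 (some c) (by simpa [pvIsOpO] using hoc)]; rfl
        · rw [ih1 (some c) (by simpa [pvIsOpO] using hoc) (by simp [hcs])]; rfl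

lemma pvP_none_plain (p : List Char) (hp : ∀ c ∈ p, pvIsQuote c = false) :
    pvP none p = pvNormPlain p :=
  (pvPlain p hp).1 none rfl (by simp)

lemma lowerChar_quote {q : Char} (hq : pvIsQuote q = true) : PySem.Chars.lowerChar q = q := by
  rcases (by simpa [pvIsQuote] using hq : q = '\'' ∨ q = '"') with h | h <;> subst h <;> rfl

lemma quote_not_op {q : Char} (hq : pvIsQuote q = true) : pvIsOp q = false := by
  rcases (by simpa [pvIsQuote] using hq : q = '\'' ∨ q = '"') with h | h <;> subst h <;> rfl

lemma quote_ne_space {q : Char} (hq : pvIsQuote q = true) : q ≠ ' ' := ne_space_of_quote hq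

lemma dw_head {p : Char → Bool} {l t : List Char} {a : Char} (h : l.dropWhile p = a :: t) :
    p a = false := by
  have hne : l.dropWhile p ≠ [] := by simp [h]
  have hh := List.head_dropWhile_not p hne
  rwa [show (l.dropWhile p).head hne = a from by simp [h]] at hh

lemma altGo_eq_P : ∀ (n : Nat) (cs : List Char), cs.length ≤ n → altGo cs = pvP none cs := by
  intro n
  induction n with
  | zero =>
    intro cs hlen
    have : cs = [] := List.length_eq_zero_iff.mp (Nat.le_zero.mp hlen)
    subst this
    rw [altGo.eq_def]
    simp [pvP, pvPend, pvNormPlain, pvRmOps, pvCollapse, PySem.Chars.lower]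
  | succ n ihn =>
    intro cs hlen
    have hsplit := List.takeWhile_append_dropWhile (p := fun c => !pvIsQuote c) (l := cs)
    have hp : ∀ c ∈ cs.takeWhile (fun c => !pvIsQuote c), pvIsQuote c = false := by
      intro c hcmem
      simpa using List.mem_takeWhile_imp hcmem
    rw [altGo.eq_def]
    cases hdw : cs.dropWhile (fun c => !pvIsQuote c) with
    | nil =>
      have hcs : cs.takeWhile (fun c => !pvIsQuote c) = cs := by
        rw [hdw, List.append_nil] at hsplit; exact hsplit
      rw [hcs] at hp
      simp only [hdw]
      rw [hcs]
      exact (pvP_none_plain cs hp).symm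
    | cons q tail =>
      have hq : pvIsQuote q = true := by simpa using dw_head hdw
      have hcs : cs = cs.takeWhile (fun c => !pvIsQuote c) ++ q :: tail := by
        conv_lhs => rw [← hsplit]
        rw [hdw]
      have hlen1 : tail.length + 1 ≤ cs.length := by
        have := List.length_dropWhile_le (fun c => !pvIsQuote c) cs
        rw [hdw] at this; simpa using this
      simp only [hdw]
      conv_rhs => rw [hcs]
      rw [pvP_append_quote q hq _ hp none tail, pvP_none_plain _ hp, lowerChar_quote hq,
          pvS_split q tail]
      congr 2
      cases h2 : tail.dropWhile (fun c => c != q) with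
      | nil => rfl
      | cons q2 t2 =>
        have hq2 : q2 = q := by simpa using dw_head h2
        subst hq2
        have hlen2 : t2.length + 1 ≤ tail.length := by
          have := List.length_dropWhile_le (fun c => c != q2) tail
          rw [h2] at this; simpa using this
        congr 1
        show q2 :: altGo t2 = q2 :: pvP (some q2) t2
        rw [pvP_state_irrel (some q2) (by simpa using quote_ne_space hq)
              (by simpa [pvIsOpO] using quote_not_op hq) t2]
        rw [ihn t2 (by omega)]

-- ===== VERDICT (by name: the statement is the Claim_ definition above) =====
theorem normalize_expr_spec : Claim_equal_normalize_expr := by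
  intro e _
  unfold Spec_normalize_expr normalize_expr normalize_expr_alt
  have h1 := (aGo_P e.toList).1 none []
  simp [pvPend] at h1
  rw [h1, altGo_eq_P e.toList.length e.toList le_rfl]
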